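-- pv_equiv track=rewrite | github.com/aparaschiveiadrian/FMI-work | year1/semester1/ProgAlgo/python-lab/lab4/.py | cerinta_d
-- ===== SOURCE A (Python) =====
-- def cerinta_d(dictionar):
--     maxim = max(dictionar.values())
--     cheie_maxim = ""
--     for cheie in dictionar.keys():
--         if dictionar[cheie] == maxim:
--             if cheie_maxim == "" or cheie<cheie_maxim:
--                 cheie_maxim = cheie
--     return cheie_maxim
-- ===== SOURCE B (Python) =====
-- def cerinta_d(dictionar):
--     it = iter(dictionar.items())
--     try:
--         best_key, best_val = next(it)
--     except StopIteration:
--         raise ValueError("cerinta_d() arg is an empty dict")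
--     for k, v in it:
--         if v > best_val:
--             best_val = v
--             best_key = k
--         elif v == best_val and k < best_key:
--             best_key = k
--     return best_key
-- ===== Notes on version B (the rewrite author's own statement) =====
-- stated objective: alternative
-- what changed: Replaces A's two-pass scheme (compute max(values), then rescan the keys with a dict lookup per key and the sentinel '' for 'no key yet') by a single fused pass over items() maintaining a running (best_key, best_val) pair seeded from the first item, with no lookups and no sentinel.
-- intended difference: On dicts where the empty-string key '' holds the maximum value and some later key also holds the maximum, A's sentinel '' is mistaken for 'no key found yet' and A returns the smallest maximal key occurring after '' (e.g. 'a' for {'':1,'a':1}), while B returns '', the true smallest key with maximum value, which is the intended answer. — e.g. on cerinta_d([("", 1), ("a", 1)]): A returns "a", B returns ""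
import Mathlib
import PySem

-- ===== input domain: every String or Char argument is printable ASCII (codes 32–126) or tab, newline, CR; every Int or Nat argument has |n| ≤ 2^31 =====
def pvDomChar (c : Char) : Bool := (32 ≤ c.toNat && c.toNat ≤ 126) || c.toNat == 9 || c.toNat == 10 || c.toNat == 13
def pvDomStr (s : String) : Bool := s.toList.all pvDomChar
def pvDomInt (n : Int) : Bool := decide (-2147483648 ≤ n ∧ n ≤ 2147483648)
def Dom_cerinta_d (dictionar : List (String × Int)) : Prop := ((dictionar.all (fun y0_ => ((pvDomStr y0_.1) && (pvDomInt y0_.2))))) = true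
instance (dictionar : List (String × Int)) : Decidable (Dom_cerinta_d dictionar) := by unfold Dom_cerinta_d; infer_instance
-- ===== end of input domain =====

-- B replaces A's two passes (global max(values), then a rescan of the keys with a dict
-- lookup per key and the sentinel "" for "no key yet") by one fused pass over the items
-- keeping a running (best_key, best_val) pair.

-- ===== PORT A =====
def cerinta_d (dictionar : List (String × Int)) : String :=
  let d := PySem.Dict.ofList dictionar
  match PySem.List.max? d.values (fun v => v) with
  | none => ""      -- unreachable under Pre_cerinta_d: max() raises ValueError on an empty dict
  | some maxim =>
    d.keys.foldl (fun cheie_maxim cheie =>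
      -- dictionar[cheie]: cheie ∈ d.keys, so the KeyError branch (getD's default) is unreachable
      if d.getD cheie 0 = maxim then
        if cheie_maxim = "" ∨ cheie < cheie_maxim then cheie else cheie_maxim
      else cheie_maxim) ""

-- ===== PORT B =====
def cerinta_d_alt (dictionar : List (String × Int)) : String :=
  match (PySem.Dict.ofList dictionar).items with
  | [] => ""        -- unreachable under Pre_cerinta_d: B raises ValueError on an empty dict
  | (k0, v0) :: rest =>
    (rest.foldl (fun best kv =>
        if kv.2 > best.2 then (kv.1, kv.2)
        else if kv.2 = best.2 ∧ kv.1 < best.1 then (kv.1, best.2)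
        else best) (k0, v0)).1

-- ===== PRECONDITION & SPEC =====
-- Pre_ excludes only the empty dict, on which A (max of an empty sequence) and B both raise ValueError.
def Pre_cerinta_d (dictionar : List (String × Int)) : Prop := dictionar ≠ []
instance (dictionar : List (String × Int)) : Decidable (Pre_cerinta_d dictionar) := by unfold Pre_cerinta_d; infer_instance
def pvWitness_cerinta_d : (List (String × Int)) := [("a", 1), ("b", 2)]

-- On dicts where the key "" holds the maximum value and some later key also holds the maximum,
-- A's sentinel "" is mistaken for "no key found yet" and A returns the smallest maximal key
-- occurring after "", while B returns "", the true smallest key with maximum value (the intended answer).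
def D_cerinta_d (dictionar : List (String × Int)) : Prop :=
  let l := (PySem.Dict.ofList dictionar).items
  ∃ i : Fin l.length, ∃ j : Fin l.length, i < j ∧
    (l.get i).1 = "" ∧ (l.get j).2 = (l.get i).2 ∧
    PySem.List.max? (l.map (fun p => p.2)) (fun v => v) = some (l.get i).2
instance (dictionar : List (String × Int)) : Decidable (D_cerinta_d dictionar) := by unfold D_cerinta_d; infer_instance

def Spec_cerinta_d (dictionar : List (String × Int)) (out : String) : Prop :=
  ¬ D_cerinta_d dictionar → out = cerinta_d_alt dictionar
instance (dictionar : List (String × Int)) (out : String) : Decidable (Spec_cerinta_d dictionar out) := by unfold Spec_cerinta_d; infer_instance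

def pvDiffWitness_cerinta_d : (List (String × Int)) := [("", 1), ("a", 1)]
def pvDiffWitnessOut_cerinta_d : String × String := ("a", "")

-- ===== CLAIM (what is proved, stated in full; the proofs are below) =====
def Claim_unchanged_cerinta_d : Prop := ∀ (dictionar : List (String × Int)), Dom_cerinta_d dictionar → Pre_cerinta_d dictionar → Spec_cerinta_d dictionar (cerinta_d dictionar)
def Claim_changed_cerinta_d : Prop := Dom_cerinta_d (pvDiffWitness_cerinta_d) ∧ Pre_cerinta_d (pvDiffWitness_cerinta_d) ∧ D_cerinta_d (pvDiffWitness_cerinta_d) ∧ cerinta_d (pvDiffWitness_cerinta_d) = pvDiffWitnessOut_cerinta_d.1 ∧ cerinta_d_alt (pvDiffWitness_cerinta_d) = pvDiffWitnessOut_cerinta_d.2 ∧ pvDiffWitnessOut_cerinta_d.1 ≠ pvDiffWitnessOut_cerinta_d.2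
def Claim_exact_cerinta_d : Prop := ∀ (dictionar : List (String × Int)), Dom_cerinta_d dictionar → Pre_cerinta_d dictionar → D_cerinta_d dictionar → cerinta_d dictionar ≠ cerinta_d_alt dictionar

-- ===== LEMMAS AND PROOFS =====

-- A's loop body (with the global maximum m fixed) and B's loop body, as named functions.
def stepA (m : Int) (s : String) (p : String × Int) : String :=
  if p.2 = m then (if s = "" ∨ p.1 < s then p.1 else s) else s

def stepB (b : String × Int) (kv : String × Int) : String × Int :=
  if kv.2 > b.2 then (kv.1, kv.2)
  else if kv.2 = b.2 ∧ kv.1 < b.1 then (kv.1, b.2)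
  else b

-- keys of the pairs holding value m, in order
def mkeys (m : Int) (l : List (String × Int)) : List String :=
  l.filterMap (fun p => if p.2 = m then some p.1 else none)

-- minimum of a list of strings ("" for the empty list)
def refMin : List String → String
  | [] => ""
  | h :: t => t.foldl min h

-- "no pair ("", m) is followed by another pair holding m"
def Pok (m : Int) (l : List (String × Int)) : Prop :=
  ∀ l₁ l₂, l = l₁ ++ ("", m) :: l₂ → ∀ p ∈ l₂, p.2 ≠ m

-- ---- string order facts ----
lemma str_empty_lt (s : String) (h : s ≠ "") : "" < s := by
  have h0 : ("" : String).toList = [] := by simp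
  rw [String.lt_iff_toList_lt, h0]
  cases hs : s.toList with
  | nil => exact absurd (String.toList_inj.mp (hs.trans h0.symm)) h
  | cons a t => exact List.nil_lt_cons a t

lemma str_empty_le (s : String) : "" ≤ s := by
  rcases eq_or_ne s "" with rfl | h
  · exact le_refl _
  · exact le_of_lt (str_empty_lt s h)

lemma str_min_empty (s : String) : min s "" = "" := min_eq_right (str_empty_le s)

-- ---- fold-min facts ----
lemma foldl_min_eq_empty (t : List String) : ∀ s, ("" ∈ t ∨ s = "") → t.foldl min s = "" := by
  induction t with
  | nil =>
    intro s h
    simpa using h.resolve_left (by simp)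
  | cons a t ih =>
    intro s h
    simp only [List.foldl_cons]
    rcases h with h | rfl
    · rcases List.mem_cons.mp h with rfl | h2
      · exact ih (min s "") (Or.inr (str_min_empty s))
      · exact ih _ (Or.inl h2)
    · exact ih (min "" a) (Or.inr (min_eq_left (str_empty_le a)))

lemma refMin_mem_empty (xs : List String) (h : "" ∈ xs) : refMin xs = "" := by
  cases xs with
  | nil => rfl
  | cons a t =>
    rcases List.mem_cons.mp h with rfl | h2
    · exact foldl_min_eq_empty t "" (Or.inr rfl)
    · exact foldl_min_eq_empty t a (Or.inl h2)

-- ---- mkeys / Pok facts ----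
lemma mkeys_cons_pos (m : Int) (p : String × Int) (t : List (String × Int)) (h : p.2 = m) :
    mkeys m (p :: t) = p.1 :: mkeys m t := by simp [mkeys, h]

lemma mkeys_cons_neg (m : Int) (p : String × Int) (t : List (String × Int)) (h : p.2 ≠ m) :
    mkeys m (p :: t) = mkeys m t := by simp [mkeys, h]

lemma mkeys_nil_of_nomax (m : Int) (l : List (String × Int)) (h : ∀ p ∈ l, p.2 ≠ m) :
    mkeys m l = [] := by
  simp only [mkeys, List.filterMap_eq_nil_iff]
  intro p hp
  simp [h p hp]

lemma mem_mkeys (m : Int) (l : List (String × Int)) (p : String × Int) (hp : p ∈ l) (hm : p.2 = m) :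
    p.1 ∈ mkeys m l := by
  simp only [mkeys, List.mem_filterMap]
  exact ⟨p, hp, by simp [hm]⟩

lemma Pok_tail (m : Int) (p : String × Int) (t : List (String × Int)) (h : Pok m (p :: t)) :
    Pok m t := by
  intro l₁ l₂ heq q hq hqm
  exact h (p :: l₁) l₂ (by simp [heq]) q hq hqm

lemma Pok_head (m : Int) (t : List (String × Int)) (h : Pok m (("", m) :: t)) :
    ∀ p ∈ t, p.2 ≠ m :=
  h [] t rfl

-- ---- A-side loop lemmas ----
lemma stepA_no (m : Int) (s : String) (p : String × Int) (h : p.2 ≠ m) : stepA m s p = s := by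
  simp [stepA, h]

lemma stepA_empty_key (m : Int) (s : String) : stepA m s ("", m) = "" := by
  have hc : s = "" ∨ ("" : String) < s := by
    rcases eq_or_ne s "" with rfl | h
    · exact Or.inl rfl
    · exact Or.inr (str_empty_lt s h)
  have hred : stepA m s ("", m)
      = if m = m then (if s = "" ∨ "" < s then "" else s) else s := rfl
  rw [hred, if_pos rfl, if_pos hc]

lemma stepA_min (m : Int) (s : String) (k : String) (hs : s ≠ "") :
    stepA m s (k, m) = min s k := by
  by_cases hks : k < s
  · have h1 : stepA m s (k, m) = k := by simp [stepA, hks]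
    rw [h1, min_def, if_neg (not_le.mpr hks)]
  · have h1 : stepA m s (k, m) = s := by simp [stepA, hs, hks]
    rw [h1, min_def, if_pos (le_of_not_gt hks)]

lemma foldA_nomax (m : Int) (l : List (String × Int)) (s : String) (h : ∀ p ∈ l, p.2 ≠ m) :
    l.foldl (stepA m) s = s := by
  induction l with
  | nil => rfl
  | cons p t ih =>
    simp only [List.foldl_cons]
    rw [stepA_no m s p (h p (List.mem_cons_self ..))]
    exact ih (fun q hq => h q (List.mem_cons_of_mem _ hq))

lemma foldA_run (m : Int) (l : List (String × Int)) : ∀ s : String, s ≠ "" → Pok m l →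
    l.foldl (stepA m) s = (mkeys m l).foldl min s := by
  induction l with
  | nil => intro s _ _; rfl
  | cons p t ih =>
    intro s hs hp
    obtain ⟨k, v⟩ := p
    by_cases hv : v = m
    · subst hv
      by_cases hk : k = ""
      · subst hk
        have hno : ∀ q ∈ t, q.2 ≠ v := Pok_head v t hp
        simp only [List.foldl_cons]
        rw [stepA_empty_key v s, foldA_nomax v t "" hno,
            mkeys_cons_pos v ("", v) t rfl, mkeys_nil_of_nomax v t hno]
        simp [str_min_empty]
      · simp only [List.foldl_cons]
        rw [stepA_min v s k hs, mkeys_cons_pos v (k, v) t rfl]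
        simp only [List.foldl_cons]
        have hne : min s k ≠ "" := by
          rcases min_choice s k with h | h <;> rw [h] <;> assumption
        exact ih (min s k) hne (Pok_tail v (k, v) t hp)
    · simp only [List.foldl_cons]
      rw [stepA_no m s (k, v) hv, mkeys_cons_neg m (k, v) t hv]
      exact ih s hs (Pok_tail m (k, v) t hp)

lemma foldA_start (m : Int) (l : List (String × Int)) (hp : Pok m l) :
    l.foldl (stepA m) "" = refMin (mkeys m l) := by
  cases l with
  | nil => rfl
  | cons p t =>
    obtain ⟨k, v⟩ := p
    by_cases hv : v = m
    · subst hv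
      by_cases hk : k = ""
      · subst hk
        have hno : ∀ q ∈ t, q.2 ≠ v := Pok_head v t hp
        simp only [List.foldl_cons]
        rw [stepA_empty_key v "", foldA_nomax v t "" hno,
            mkeys_cons_pos v ("", v) t rfl, mkeys_nil_of_nomax v t hno]
        rfl
      · simp only [List.foldl_cons]
        have h1 : stepA v "" (k, v) = k := by simp [stepA]
        rw [h1, foldA_run v t k hk (Pok_tail v (k, v) t hp),
            mkeys_cons_pos v (k, v) t rfl]
        rfl
    · simp only [List.foldl_cons]
      rw [stepA_no m "" (k, v) hv, mkeys_cons_neg m (k, v) t hv]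
      exact foldA_start m t (Pok_tail m (k, v) t hp)

lemma foldA_ne_empty (m : Int) (l : List (String × Int)) : ∀ s : String,
    "" ∉ l.map Prod.fst → (s ≠ "" ∨ ∃ p ∈ l, p.2 = m) →
    l.foldl (stepA m) s ≠ "" := by
  induction l with
  | nil =>
    intro s _ h
    rcases h with h | ⟨p, hp, _⟩
    · exact h
    · exact absurd hp (List.not_mem_nil)
  | cons q t ih =>
    intro s hk h
    obtain ⟨k, v⟩ := q
    rw [List.map_cons] at hk
    have hk1 : k ≠ "" := fun hh => hk (by simp [hh])
    have hk2 : "" ∉ t.map Prod.fst := fun hh => hk (List.mem_cons_of_mem _ hh)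
    simp only [List.foldl_cons]
    by_cases hv : v = m
    · have hs' : stepA m s (k, v) ≠ "" := by
        have hred : stepA m s (k, v)
            = if v = m then (if s = "" ∨ k < s then k else s) else s := rfl
        by_cases hcond : s = "" ∨ k < s
        · have h1 : stepA m s (k, v) = k := by rw [hred, if_pos hv, if_pos hcond]
          rw [h1]; exact hk1
        · have h1 : stepA m s (k, v) = s := by rw [hred, if_pos hv, if_neg hcond]
          rw [h1]; intro hse; exact hcond (Or.inl hse)
      exact ih _ hk2 (Or.inl hs')
    · rw [stepA_no m s (k, v) hv]
      rcases h with hsne | ⟨p, hp, hpm⟩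
      · exact ih s hk2 (Or.inl hsne)
      · rcases List.mem_cons.mp hp with rfl | hp2
        · exact absurd hpm hv
        · exact ih s hk2 (Or.inr ⟨p, hp2, hpm⟩)

-- ---- B-side loop lemmas ----
lemma foldB_fst (l : List (String × Int)) : ∀ (k : String) (v : Int),
    (l.foldl stepB (k, v)).1 =
      refMin (mkeys ((l.map (fun p => p.2)).foldl max v) ((k, v) :: l)) := by
  induction l with
  | nil =>
    intro k v
    simp [mkeys, refMin]
  | cons q t ih =>
    intro k v
    obtain ⟨k', v'⟩ := q
    simp only [List.foldl_cons, List.map_cons]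
    by_cases h1 : v' > v
    · rw [show stepB (k, v) (k', v') = (k', v') from by simp [stepB, h1]]
      rw [ih k' v']
      rw [show max v v' = v' from max_eq_right (le_of_lt h1)]
      have hvM : v ≠ (t.map (fun p => p.2)).foldl max v' := by
        have := (PySem.List.le_foldl_max (t.map (fun p => p.2)) v').1
        omega
      rw [mkeys_cons_neg _ (k, v) _ (by simpa using hvM)]
    · have hle : v' ≤ v := le_of_not_gt h1
      rw [show max v v' = v from max_eq_left hle]
      have hvle : v ≤ (t.map (fun p => p.2)).foldl max v :=
        (PySem.List.le_foldl_max (t.map (fun p => p.2)) v).1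
      by_cases h2 : v' = v ∧ k' < k
      · have hstep : stepB (k, v) (k', v') = (k', v) := by
          simp only [stepB]
          rw [if_neg h1, if_pos h2]
        rw [hstep, ih k' v, h2.1]
        by_cases hvM : v = (t.map (fun p => p.2)).foldl max v
        · rw [mkeys_cons_pos _ (k, v) _ hvM, mkeys_cons_pos _ (k', v) _ hvM]
          show ((mkeys _ t).foldl min k' : String) = ((k' :: mkeys _ t)).foldl min k
          simp only [List.foldl_cons]
          rw [min_eq_right (le_of_lt h2.2)]
        · rw [mkeys_cons_neg _ (k, v) _ hvM, mkeys_cons_neg _ (k', v) _ hvM]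
      · have hstep : stepB (k, v) (k', v') = (k, v) := by
          simp only [stepB]
          rw [if_neg h1, if_neg h2]
        rw [hstep, ih k v]
        by_cases hv'M : v' = (t.map (fun p => p.2)).foldl max v
        · -- then v' = v (v' ≤ v ≤ M = v'), so v = M as well and ¬ k' < k
          have hveq : v' = v := le_antisymm hle (by omega)
          have hvM : v = (t.map (fun p => p.2)).foldl max v := by omega
          have hkk : ¬ k' < k := fun hlt => h2 ⟨hveq, hlt⟩
          rw [mkeys_cons_pos _ (k, v) ((k', v') :: t) hvM,
              mkeys_cons_pos _ (k', v') t (hveq.trans hvM),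
              mkeys_cons_pos _ (k, v) t hvM]
          show ((mkeys _ t).foldl min k : String) = (k' :: mkeys _ t).foldl min k
          simp only [List.foldl_cons]
          rw [min_eq_left (le_of_not_gt hkk)]
        · by_cases hvM : v = (t.map (fun p => p.2)).foldl max v
          · rw [mkeys_cons_pos _ (k, v) ((k', v') :: t) hvM,
                mkeys_cons_neg _ (k', v') t hv'M,
                mkeys_cons_pos _ (k, v) t hvM]
          · rw [mkeys_cons_neg _ (k, v) ((k', v') :: t) hvM,
                mkeys_cons_neg _ (k', v') t hv'M,
                mkeys_cons_neg _ (k, v) t hvM]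

-- ---- bridging the ports to the loop lemmas ----
lemma items_foldl_insert_ne_nil (ps : List (String × Int)) :
    ∀ d : PySem.Dict String Int, d.items ≠ [] →
      (ps.foldl (fun d q => d.insert q.1 q.2) d).items ≠ [] := by
  induction ps with
  | nil => intro d h; exact h
  | cons p t ih =>
    intro d h
    simp only [List.foldl_cons]
    apply ih
    cases hc : d.contains p.1 with
    | true =>
      rw [PySem.Dict.items_insert_of_contains d p.2 hc]
      simpa using h
    | false =>
      rw [PySem.Dict.items_insert_of_not_contains d p.2 hc]
      simp

lemma items_ofList_ne_nil (dict : List (String × Int)) (h : dict ≠ []) :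
    (PySem.Dict.ofList dict).items ≠ [] := by
  match dict with
  | [] => exact absurd rfl h
  | p :: ps =>
    have he : PySem.Dict.ofList (p :: ps) =
        ps.foldl (fun d q => d.insert q.1 q.2) (PySem.Dict.empty.insert p.1 p.2) := rfl
    rw [he]
    apply items_foldl_insert_ne_nil
    rw [PySem.Dict.items_insert_of_not_contains _ p.2 (PySem.Dict.contains_empty p.1)]
    simp

lemma portA_eq (dict : List (String × Int)) (k0 : String) (v0 : Int) (rest : List (String × Int))
    (hl : (PySem.Dict.ofList dict).items = (k0, v0) :: rest) :
    cerinta_d dict =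
      ((k0, v0) :: rest).foldl (stepA ((rest.map (fun p => p.2)).foldl max v0)) "" := by
  have hnd : (PySem.Dict.ofList dict).keys.Nodup := PySem.Dict.nodup_keys_ofList dict
  have hv : (PySem.Dict.ofList dict).values = v0 :: rest.map (fun p => p.2) := by
    show (PySem.Dict.ofList dict).items.map (fun p => p.2) = _
    rw [hl, List.map_cons]
  simp only [cerinta_d]
  rw [hv, PySem.List.max?_id_cons]
  show (PySem.Dict.ofList dict).keys.foldl
      (fun s k => stepA ((rest.map (fun p => p.2)).foldl max v0) s
        (k, (PySem.Dict.ofList dict).getD k 0)) "" = _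
  rw [← List.foldl_map, ← PySem.Dict.items_eq_map_keys _ hnd 0, hl]

lemma portB_eq (dict : List (String × Int)) (k0 : String) (v0 : Int) (rest : List (String × Int))
    (hl : (PySem.Dict.ofList dict).items = (k0, v0) :: rest) :
    cerinta_d_alt dict = (rest.foldl stepB (k0, v0)).1 := by
  simp only [cerinta_d_alt, hl]
  rfl

lemma not_D_Pok (dict : List (String × Int)) (k0 : String) (v0 : Int) (rest : List (String × Int))
    (hl : (PySem.Dict.ofList dict).items = (k0, v0) :: rest)
    (hnD : ¬ D_cerinta_d dict) :
    Pok ((rest.map (fun p => p.2)).foldl max v0) ((k0, v0) :: rest) := by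
  set M := (rest.map (fun p => p.2)).foldl max v0 with hM
  intro l₁ l₂ heq p hp hpm
  apply hnD
  simp only [D_cerinta_d]
  have heq2 : (PySem.Dict.ofList dict).items = l₁ ++ ("", M) :: l₂ := by rw [hl, heq]
  obtain ⟨jd, hjd⟩ := List.mem_iff_get.mp hp
  have hlen : (PySem.Dict.ofList dict).items.length = l₁.length + 1 + l₂.length := by
    rw [heq2]; simp; omega
  have hjdlen := jd.2
  refine ⟨⟨l₁.length, by omega⟩, ⟨l₁.length + 1 + jd.1, by omega⟩, by simp only [Fin.lt_def]; omega, ?_, ?_, ?_⟩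
  · -- key at position l₁.length is ""
    simp only [List.get_eq_getElem, heq2]
    rw [List.getElem_append_right (le_refl l₁.length)]
    simp
  · -- value at position l₁.length + 1 + jd is the same
    simp only [List.get_eq_getElem, heq2]
    rw [List.getElem_append_right (by omega : l₁.length ≤ l₁.length + 1 + jd.1),
        List.getElem_append_right (le_refl l₁.length)]
    have h1 : l₁.length + 1 + jd.1 - l₁.length = jd.1 + 1 := by omega
    simp only [h1, List.getElem_cons_succ, Nat.sub_self, List.getElem_cons_zero]
    have h2 : l₂[jd.1]'(by exact jd.2) = p := by simpa [List.get_eq_getElem] using hjd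
    rw [h2, hpm]
  · -- the maximum of the values is the value at position l₁.length
    simp only [List.get_eq_getElem, heq2]
    rw [List.getElem_append_right (le_refl l₁.length)]
    simp only [Nat.sub_self, List.getElem_cons_zero]
    rw [← heq2, hl, List.map_cons, PySem.List.max?_id_cons]

-- value of A's maxim extracted from a D_ witness
lemma maxq_eq (dict : List (String × Int)) (k0 : String) (v0 : Int) (rest : List (String × Int))
    (hl : (PySem.Dict.ofList dict).items = (k0, v0) :: rest)
    (x : Int)
    (hx : PySem.List.max? ((PySem.Dict.ofList dict).items.map (fun p => p.2)) (fun v => v) = some x) :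
    x = (rest.map (fun p => p.2)).foldl max v0 := by
  rw [hl, List.map_cons, PySem.List.max?_id_cons] at hx
  exact (Option.some.inj hx).symm

-- ===== VERDICT-SUPPORT =====
lemma cerinta_d_alt_diffwitness : cerinta_d_alt pvDiffWitness_cerinta_d = "" := by
  have hlt : ¬ ("a" : String) < "" := by
    rw [String.lt_iff_toList_lt, show ("" : String).toList = [] from by simp]
    exact List.not_lt_nil _
  have hitems : (PySem.Dict.ofList pvDiffWitness_cerinta_d).items = [("", 1), ("a", 1)] := rfl
  simp only [cerinta_d_alt, hitems, List.foldl_cons, List.foldl_nil]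
  rw [if_neg (by omega), if_neg (by intro hx; exact hlt hx.2)]

-- ===== VERDICT (by name: the statement is the Claim_ definition above) =====
theorem cerinta_d_spec : Claim_unchanged_cerinta_d := by
  unfold Claim_unchanged_cerinta_d Spec_cerinta_d
  intro dict _hdom hpre hnD
  obtain ⟨p, l', hl⟩ : ∃ p l', (PySem.Dict.ofList dict).items = p :: l' := by
    cases hh : (PySem.Dict.ofList dict).items with
    | nil => exact absurd hh (items_ofList_ne_nil dict hpre)
    | cons a b => exact ⟨a, b, rfl⟩
  obtain ⟨k0, v0⟩ := p
  rw [portA_eq dict k0 v0 l' hl, portB_eq dict k0 v0 l' hl,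
      foldA_start _ _ (not_D_Pok dict k0 v0 l' hl hnD), foldB_fst]

theorem cerinta_d_changed : Claim_changed_cerinta_d := by
  unfold Claim_changed_cerinta_d
  refine ⟨by decide, by decide, by decide, by decide, cerinta_d_alt_diffwitness, by decide⟩

theorem cerinta_d_tight : Claim_exact_cerinta_d := by
  unfold Claim_exact_cerinta_d
  intro dict _hdom hpre hD
  obtain ⟨p, l', hl⟩ : ∃ p l', (PySem.Dict.ofList dict).items = p :: l' := by
    cases hh : (PySem.Dict.ofList dict).items with
    | nil => exact absurd hh (items_ofList_ne_nil dict hpre)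
    | cons a b => exact ⟨a, b, rfl⟩
  obtain ⟨k0, v0⟩ := p
  simp only [D_cerinta_d, List.get_eq_getElem] at hD
  obtain ⟨i, j, hij, hi1, hj2, hmax⟩ := hD
  have hiM : ((PySem.Dict.ofList dict).items[i.1]'i.2).2 = ((l'.map (fun p => p.2)).foldl max v0) := by
    exact maxq_eq dict k0 v0 l' hl _ (by simpa [List.get_eq_getElem] using hmax)
  have hgi : (PySem.Dict.ofList dict).items[i.1]'i.2 = ("", (l'.map (fun p => p.2)).foldl max v0) := by
    cases hg : (PySem.Dict.ofList dict).items[i.1]'i.2 with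
    | mk a b =>
      rw [hg] at hi1 hiM
      simp only at hi1 hiM
      rw [hi1, hiM]
  -- B returns ""
  have hB : cerinta_d_alt dict = "" := by
    rw [portB_eq dict k0 v0 l' hl, foldB_fst, ← hl]
    apply refMin_mem_empty
    have hmm := mem_mkeys ((l'.map (fun p => p.2)).foldl max v0) (PySem.Dict.ofList dict).items
      ((PySem.Dict.ofList dict).items[i.1]'i.2) (List.getElem_mem i.2) hiM
    rwa [hgi] at hmm
  -- A returns something ≠ ""
  have hA : cerinta_d dict ≠ "" := by
    rw [portA_eq dict k0 v0 l' hl, ← hl]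
    have hsplit : (PySem.Dict.ofList dict).items =
        (PySem.Dict.ofList dict).items.take i.1 ++
          ((PySem.Dict.ofList dict).items[i.1]'i.2) ::
            (PySem.Dict.ofList dict).items.drop (i.1 + 1) := by
      rw [List.getElem_cons_drop, List.take_append_drop]
    rw [hsplit, List.foldl_append, List.foldl_cons, hgi, stepA_empty_key]
    have hnd : ((PySem.Dict.ofList dict).items.map Prod.fst).Nodup :=
      PySem.Dict.nodup_keys_ofList dict
    have hnd2 : "" ∉ ((PySem.Dict.ofList dict).items.drop (i.1 + 1)).map Prod.fst := by
      rw [hsplit, List.map_append, List.map_cons, hgi] at hnd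
      exact (List.nodup_cons.mp hnd.of_append_right).1
    apply foldA_ne_empty _ _ "" hnd2
    refine Or.inr ⟨(PySem.Dict.ofList dict).items[j.1]'j.2, ?_, by
      simpa [List.get_eq_getElem, hiM] using hj2⟩
    have hjd : (PySem.Dict.ofList dict).items[j.1]'j.2 =
        ((PySem.Dict.ofList dict).items.drop (i.1 + 1))[j.1 - (i.1 + 1)]'(by
          simp only [List.length_drop]; omega) := by
      rw [List.getElem_drop]
      congr 1
      omega
    rw [hjd]
    exact List.getElem_mem _
  intro hAB
  rw [hAB, hB] at hA
  exact hA rfl
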